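-- pv_equiv track=rewrite | github.com/pathev/ChessTrainer | AutoPGN.py | total_nodes
-- ===== SOURCE A (Python) =====
-- def total_nodes(pmpv,ompv,depth):
--     S=1
--     end_nodes=1
--     for i in range(depth):
--         mpv = pmpv if i%2==0 else ompv
--         S+= end_nodes*mpv
--         end_nodes*= mpv
--     return S
-- ===== SOURCE B (Python) =====
-- def total_nodes(pmpv, ompv, depth):
--     # Closed form: nodes per level form pmpv, pmpv*ompv, pmpv^2*ompv, ... ;
--     # pairs of levels contribute (pmpv + q) * q^j with q = pmpv*ompv, summed geometrically.
--     n = max(depth, 0)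
--     h, odd = divmod(n, 2)
--     q = pmpv * ompv
--     qh = q ** h
--     geo = h if q == 1 else (qh - 1) // (q - 1)
--     return 1 + (pmpv + q) * geo + (pmpv * qh if odd else 0)
-- ===== Notes on version B (the rewrite author's own statement) =====
-- stated objective: faster
-- what changed: Replaces A's O(depth) loop maintaining a running sum and running product with a closed form: a geometric-series sum over q = pmpv*ompv evaluated via exponentiation, plus an odd-level correction.
import Mathlib
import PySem

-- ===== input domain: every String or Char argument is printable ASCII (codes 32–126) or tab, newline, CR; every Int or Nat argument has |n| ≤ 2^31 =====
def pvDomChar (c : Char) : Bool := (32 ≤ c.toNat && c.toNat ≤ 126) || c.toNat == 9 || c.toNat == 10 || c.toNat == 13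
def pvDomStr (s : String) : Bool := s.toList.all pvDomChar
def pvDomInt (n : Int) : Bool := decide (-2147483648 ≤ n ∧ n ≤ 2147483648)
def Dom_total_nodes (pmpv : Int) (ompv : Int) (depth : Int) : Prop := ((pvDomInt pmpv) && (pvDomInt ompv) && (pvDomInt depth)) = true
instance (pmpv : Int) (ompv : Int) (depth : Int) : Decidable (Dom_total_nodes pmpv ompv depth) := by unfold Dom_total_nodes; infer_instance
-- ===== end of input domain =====

-- B replaces A's depth-long loop with a closed form (geometric-series sum over q = pmpv*ompv
-- plus an odd-level correction); objective: faster.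

-- ===== PORT A =====
-- literal transliteration: for i in range(depth), state (S, end_nodes)
def total_nodes (pmpv : Int) (ompv : Int) (depth : Int) : Int :=
  (List.foldl
    (fun (st : Int × Int) (i : Int) =>
      let mpv := if i % 2 == 0 then pmpv else ompv
      (st.1 + st.2 * mpv, st.2 * mpv))
    (1, 1)
    (PySem.List.pyRange 0 depth 1)).1

-- ===== PORT B =====
-- literal transliteration of Source B: n = max(depth,0); h, odd = divmod(n, 2); q = pmpv*ompv;
-- qh = q**h (h ≥ 0 always, so the Nat exponent q ^ h.toNat is exact);
-- geo = h if q == 1 else (qh-1)//(q-1); return 1 + (pmpv+q)*geo + (pmpv*qh if odd else 0)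
def total_nodes_alt (pmpv : Int) (ompv : Int) (depth : Int) : Int :=
  let n := max depth 0
  let h := PySem.Int.floordiv n 2
  let odd := PySem.Int.mod n 2
  let q := pmpv * ompv
  let qh := q ^ h.toNat
  let geo := if q == 1 then h else PySem.Int.floordiv (qh - 1) (q - 1)
  1 + (pmpv + q) * geo + (if odd == 1 then pmpv * qh else 0)

-- ===== PRECONDITION & SPEC =====
def Spec_total_nodes (pmpv : Int) (ompv : Int) (depth : Int) (out : Int) : Prop := out = total_nodes_alt pmpv ompv depth
instance (pmpv : Int) (ompv : Int) (depth : Int) (out : Int) : Decidable (Spec_total_nodes pmpv ompv depth out) := by unfold Spec_total_nodes; infer_instance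

-- ===== CLAIM =====
def Claim_equal_total_nodes : Prop := ∀ (pmpv : Int) (ompv : Int) (depth : Int), Dom_total_nodes pmpv ompv depth → Spec_total_nodes pmpv ompv depth (total_nodes pmpv ompv depth)

-- ===== LEMMAS AND PROOFS =====

-- exact floor division: (a*b) // b = a for b ≠ 0
theorem pv_floordiv_mul_cancel (a b : Int) (hb : b ≠ 0) :
    PySem.Int.floordiv (a * b) b = a := by
  simp [PySem.Int.floordiv, Int.mul_fdiv_cancel a hb]

-- A's loop over range(0, 2h) ends in state (1 + (p+q)·Σ_{i<h} q^i, q^h), q = p*o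
theorem loopA_even (p o : Int) (h : Nat) :
    List.foldl
      (fun (st : Int × Int) (i : Int) =>
        let mpv := if i % 2 == 0 then p else o
        (st.1 + st.2 * mpv, st.2 * mpv))
      (1, 1)
      (PySem.List.pyRange 0 (2 * (h : Int)) 1)
    = (1 + (p + p * o) * ∑ i ∈ Finset.range h, (p * o) ^ i, (p * o) ^ h) := by
  induction h with
  | zero => rw [PySem.List.pyRange_one_eq_nil (by norm_num)]; simp
  | succ m ih =>
    have h1 : 2 * ((m + 1 : Nat) : Int) = (2 * (m : Int) + 1) + 1 := by push_cast; ring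
    rw [h1, PySem.List.pyRange_one_succ_right (by omega),
        PySem.List.pyRange_one_succ_right (by omega),
        List.foldl_append, List.foldl_append, ih]
    have he : ((2 * (m : Int)) % 2 == 0) = true := by simp [Int.mul_emod_right]
    have hoo : ((2 * (m : Int) + 1) % 2 == 0) = false := by
      simp only [beq_eq_false_iff_ne, ne_eq]; omega
    simp only [List.foldl_cons, List.foldl_nil, he, hoo, if_true,
      Bool.false_eq_true, if_false, Finset.sum_range_succ, Prod.mk.injEq]
    constructor <;> ring

-- one extra (even-indexed) step for the odd level
theorem loopA_odd (p o : Int) (h : Nat) :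
    (List.foldl
      (fun (st : Int × Int) (i : Int) =>
        let mpv := if i % 2 == 0 then p else o
        (st.1 + st.2 * mpv, st.2 * mpv))
      (1, 1)
      (PySem.List.pyRange 0 (2 * (h : Int) + 1) 1)).1
    = 1 + (p + p * o) * ∑ i ∈ Finset.range h, (p * o) ^ i + p * (p * o) ^ h := by
  rw [PySem.List.pyRange_one_succ_right (by omega), List.foldl_append, loopA_even]
  have he : ((2 * (h : Int)) % 2 == 0) = true := by simp [Int.mul_emod_right]
  simp only [List.foldl_cons, List.foldl_nil, he, if_true]
  ring

-- B's geo equals the geometric sum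
theorem geo_eq (q : Int) (h : Nat) :
    (if q == 1 then (h : Int) else PySem.Int.floordiv (q ^ h - 1) (q - 1))
    = ∑ i ∈ Finset.range h, q ^ i := by
  by_cases hq : q = 1
  · simp [hq]
  · have hb : q - 1 ≠ 0 := by omega
    rw [if_neg (by simpa using hq), ← geom_sum_mul q h, pv_floordiv_mul_cancel _ _ hb]

-- ===== VERDICT =====
theorem total_nodes_spec : Claim_equal_total_nodes := by
  intro p o d _
  unfold Spec_total_nodes total_nodes total_nodes_alt
  by_cases hd : d ≤ 0
  · rw [PySem.List.pyRange_one_eq_nil hd]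
    have hn : max d 0 = 0 := by omega
    simp [hn, PySem.Int.floordiv, PySem.Int.mod, Int.zero_fdiv]
  · have hn : max d 0 = d := by omega
    have hfd : PySem.Int.floordiv d 2 = d / 2 :=
      PySem.Int.floordiv_eq_ediv_of_pos (by omega)
    have hmd : PySem.Int.mod d 2 = d % 2 :=
      PySem.Int.mod_eq_emod_of_pos (by omega)
    have h2 : d / 2 = ((d / 2).toNat : Int) := by omega
    simp only [hn, hfd, hmd]
    rw [h2]
    simp only [Int.toNat_natCast]
    rw [geo_eq (p * o) (d / 2).toNat]
    rcases Int.emod_two_eq_zero_or_one d with hr | hr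
    · have hde : d = 2 * (((d / 2).toNat : Nat) : Int) := by omega
      conv_lhs => rw [hde]
      rw [loopA_even]
      simp [hr]
    · have hde : d = 2 * (((d / 2).toNat : Nat) : Int) + 1 := by omega
      conv_lhs => rw [hde]
      rw [loopA_odd]
      simp [hr]
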